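-- pv_equiv track=rewrite | github.com/GustavoPinto070/L_solutions | L06/ex9.py | reconhece
-- ===== SOURCE A (Python) =====
-- def reconhece(str:str)->bool:
--     i = 0
--     while i < len(str) and str[i] in "ABCD":
--         i += 1
--     letras = i
--     if letras == 0:     # No letters exist
--         return False
--     while i < len(str) and str[i] in "1234":
--         i += 1
--     numeros = i - letras
--     if numeros == 0:     # No numbers exist
--         return False
--     return i == len(str) # There is nothing else after the last numbers
-- ===== SOURCE B (Python) =====
-- def reconhece(str: str) -> bool:
--     # One-pass deterministic finite automaton: state 0 = start, 1 = reading
--     # letters, 2 = reading digits; any invalid transition rejects immediately.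
--     state = 0
--     for c in str:
--         if c in "ABCD" and state <= 1:
--             state = 1
--         elif c in "1234" and state >= 1:
--             state = 2
--         else:
--             return False
--     return state == 2
-- ===== Notes on version B (the rewrite author's own statement) =====
-- stated objective: alternative
-- what changed: Replaces A's two staged index-scanning while loops with count bookkeeping by a single-pass three-state finite automaton over the characters that rejects on the first invalid transition and accepts iff it ends in the digit state.
import Mathlib
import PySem

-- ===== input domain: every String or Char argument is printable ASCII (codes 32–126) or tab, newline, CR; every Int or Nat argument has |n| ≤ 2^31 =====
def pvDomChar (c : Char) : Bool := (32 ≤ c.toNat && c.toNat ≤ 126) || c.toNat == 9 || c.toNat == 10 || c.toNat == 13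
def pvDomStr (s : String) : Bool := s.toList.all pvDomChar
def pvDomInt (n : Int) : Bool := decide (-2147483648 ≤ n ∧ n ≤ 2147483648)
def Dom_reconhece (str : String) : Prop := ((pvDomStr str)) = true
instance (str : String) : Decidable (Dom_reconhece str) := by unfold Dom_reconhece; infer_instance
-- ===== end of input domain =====

-- B replaces A's two staged index-scanning loops by a one-pass three-state finite automaton over the characters (alternative algorithm, same cost).


-- ===== PORT A =====
-- 'while i < len(str) and str[i] in chars: i += 1'; index never leaves range, so cs[i] is exact.
def pvScan (chars : List Char) (cs : List Char) (i : Nat) : Nat :=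
  if h : i < cs.length then
    if chars.contains cs[i] then pvScan chars cs (i + 1) else i
  else i
termination_by cs.length - i

def reconhece (str : String) : Bool :=
  let cs := str.toList
  let i := pvScan "ABCD".toList cs 0
  let letras := i
  if letras = 0 then false
  else
    let i2 := pvScan "1234".toList cs i
    let numeros := i2 - letras
    if numeros = 0 then false
    else decide (i2 = cs.length)

-- ===== PORT B =====
-- the 'for c in str' loop with early 'return False' = structural recursion on the
-- characters carrying the automaton state; 'c in "ABCD"' = list membership (exact).
def pvLetra (c : Char) : Bool := "ABCD".toList.contains c
def pvDig (c : Char) : Bool := "1234".toList.contains c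

def pvDfa (cs : List Char) (state : Nat) : Bool :=
  match cs with
  | [] => state == 2
  | c :: rest =>
    if pvLetra c && decide (state ≤ 1) then pvDfa rest 1
    else if pvDig c && decide (1 ≤ state) then pvDfa rest 2
    else false

def reconhece_alt (str : String) : Bool := pvDfa str.toList 0

-- ===== PRECONDITION & SPEC =====
def Spec_reconhece (str : String) (out : Bool) : Prop := out = reconhece_alt str
instance (str : String) (out : Bool) : Decidable (Spec_reconhece str out) := by unfold Spec_reconhece; infer_instance

-- ===== CLAIM (what is proved, stated in full; the proofs are below) =====
def Claim_equal_reconhece : Prop := ∀ (str : String), Dom_reconhece str → Spec_reconhece str (reconhece str)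

-- ===== LEMMAS AND PROOFS =====

theorem pvScan_eq (chars : List Char) (cs : List Char) (i : Nat) :
    pvScan chars cs i = i + ((cs.drop i).takeWhile (fun c => chars.contains c)).length := by
  rw [pvScan]
  by_cases h : i < cs.length
  · rw [dif_pos h]
    have hd : cs.drop i = cs[i] :: cs.drop (i + 1) := List.drop_eq_getElem_cons h
    by_cases hc : chars.contains cs[i]
    · rw [if_pos hc, pvScan_eq chars cs (i + 1), hd,
        List.takeWhile_cons_of_pos (by exact hc), List.length_cons]
      omega
    · rw [if_neg hc, hd, List.takeWhile_cons_of_neg (by exact hc)]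
      simp
  · rw [dif_neg h, List.drop_eq_nil_of_le (by omega)]
    simp
termination_by cs.length - i

theorem drop_len_takeWhile (p : Char → Bool) (cs : List Char) :
    cs.drop (cs.takeWhile p).length = cs.dropWhile p := by
  induction cs with
  | nil => simp
  | cons a l ih =>
    by_cases h : p a
    · simp [h, ih]
    · simp [h]

-- characterisation of A's staged-loop result in terms of takeWhile/dropWhile
theorem keyA (p q : Char → Bool) (cs : List Char) :
    (if (cs.takeWhile p).length = 0 then false
     else if ((cs.takeWhile p).length + ((cs.dropWhile p).takeWhile q).length)
              - (cs.takeWhile p).length = 0 then false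
     else decide ((cs.takeWhile p).length + ((cs.dropWhile p).takeWhile q).length = cs.length))
    = (decide ((cs.takeWhile p) ≠ []) && decide ((cs.dropWhile p) ≠ []) &&
        (cs.dropWhile p).all q) := by
  set letras := (cs.takeWhile p).length with hl
  set rest := cs.dropWhile p with hrest
  set t := rest.takeWhile q with ht
  have hlen : letras + rest.length = cs.length := by
    rw [hl, hrest, ← List.length_append, List.takeWhile_append_dropWhile]
  have htl : t.length ≤ rest.length := ht ▸ (List.takeWhile_prefix q).length_le
  have hall : rest.all q = decide (t = rest) := by
    by_cases he : t = rest
    · simp only [he, decide_true]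
      rw [List.all_eq_true]
      intro a ha
      exact List.takeWhile_eq_self_iff.mp (ht ▸ he) a ha
    · simp only [he, decide_false]
      refine Bool.eq_false_iff.mpr (fun hcon => he ?_)
      exact ht ▸ List.takeWhile_eq_self_iff.mpr (List.all_eq_true.mp hcon)
  have htw : (cs.takeWhile p ≠ []) ↔ letras ≠ 0 := by
    rw [hl]; simp [List.length_eq_zero_iff]
  clear_value letras rest t
  by_cases hz : letras = 0
  · have : cs.takeWhile p = [] := by
      by_contra hc; exact htw.mp hc hz
    simp [hz, this]
  · rw [if_neg hz]
    have htw' : cs.takeWhile p ≠ [] := htw.mpr hz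
    by_cases hn : t.length = 0
    · have ht0 : t = [] := List.eq_nil_of_length_eq_zero hn
      rw [hn]
      simp only [Nat.add_zero, Nat.sub_self]
      by_cases hre : rest = []
      · simp [hre]
      · have hne : t ≠ rest := by rw [ht0]; exact fun he => hre he.symm
        rw [hall]
        simp [hne, hre]
    · have hn' : letras + t.length - letras ≠ 0 := by omega
      rw [if_neg hn']
      have hrne : rest ≠ [] := by
        intro he
        rw [he] at htl
        simp only [List.length_nil, Nat.le_zero] at htl
        exact hn htl
      have hiff : (letras + t.length = cs.length) ↔ (t = rest) := by
        constructor
        · intro he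
          have hlt : t.length = rest.length := by omega
          rw [ht]
          exact (List.takeWhile_prefix q).eq_of_length (by rw [← ht]; exact hlt)
        · intro he; rw [he]; exact hlen
      rw [hall]
      by_cases he : t = rest
      · simp [he, htw', hrne, hlen]
      · simp [hiff, he, htw', hrne]

-- automaton in the digit state: accepts iff every remaining character is a digit
theorem pvDfa_two (cs : List Char) :
    pvDfa cs 2 = cs.all pvDig := by
  induction cs with
  | nil => rfl
  | cons c t ih =>
    show (if pvLetra c && decide ((2:Nat) ≤ 1) then pvDfa t 1
          else if pvDig c && decide (1 ≤ (2:Nat)) then pvDfa t 2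
          else false) = _
    cases hq : pvDig c with
    | true => simp [hq, ih]
    | false => simp [hq]

-- automaton in the letter state: accepts iff the non-letter remainder is nonempty and all digits
theorem pvDfa_one (cs : List Char) :
    pvDfa cs 1 = (decide ((cs.dropWhile pvLetra) ≠ []) &&
      (cs.dropWhile pvLetra).all pvDig) := by
  induction cs with
  | nil => rfl
  | cons c t ih =>
    show (if pvLetra c && decide ((1:Nat) ≤ 1) then pvDfa t 1
          else if pvDig c && decide (1 ≤ (1:Nat)) then pvDfa t 2
          else false) = _
    cases hp : pvLetra c with
    | true => rw [List.dropWhile_cons_of_pos (by rw [hp])]; simp [ih]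
    | false =>
      rw [List.dropWhile_cons_of_neg (by rw [hp]; simp)]
      cases hq : pvDig c with
      | true => simp [hq, pvDfa_two]
      | false => simp [hq]

-- B's automaton from the start state equals the takeWhile/dropWhile characterisation
theorem keyB (str : String) :
    reconhece_alt str
    = (decide ((str.toList.takeWhile pvLetra) ≠ []) &&
       decide ((str.toList.dropWhile pvLetra) ≠ []) &&
       (str.toList.dropWhile pvLetra).all pvDig) := by
  unfold reconhece_alt
  cases hcs : str.toList with
  | nil => rfl
  | cons c t =>
    show (if pvLetra c && decide ((0:Nat) ≤ 1) then pvDfa t 1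
          else if pvDig c && decide (1 ≤ (0:Nat)) then pvDfa t 2
          else false) = _
    cases hp : pvLetra c with
    | true =>
      rw [List.takeWhile_cons_of_pos (by rw [hp]), List.dropWhile_cons_of_pos (by rw [hp])]
      simp [pvDfa_one]
    | false =>
      rw [List.takeWhile_cons_of_neg (by rw [hp]; simp)]
      simp [hp]

theorem reconhece_spec' (str : String) : reconhece str = reconhece_alt str := by
  rw [keyB]
  simp only [reconhece, pvScan_eq, List.drop_zero, Nat.zero_add, drop_len_takeWhile]
  exact keyA pvLetra pvDig _

-- ===== VERDICT (by name: the statement is the Claim_ definition above) =====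
theorem reconhece_spec : Claim_equal_reconhece := by
  intro str _
  unfold Spec_reconhece
  exact reconhece_spec' str
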